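-- pv_equiv track=rewrite | github.com/arin17bishwa/myCP_sols | CC/ZCO13003.py | f
-- ===== SOURCE A (Python) =====
-- def f(n, k, l):
--     alt = [0] * 1000001
--     for i in l:
--         alt[i] += 1
--     ans = 0
--     for i in range(1, 1000001):
--         alt[i] += alt[i - 1]
--     for i in range(n):  # while i<n :
--         p = k - l[i] - 1
--         if p < 0:
--             continue
--         c = alt[p]
--         if p >= l[i]:
--             c -= 1
--         ans += max(0, c)
--     return ans // 2
-- ===== SOURCE B (Python) =====
-- from bisect import bisect_right
--
-- def f(n, k, l):
--     a = sorted(l)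
--     ans = 0
--     for i in range(n):
--         p = k - l[i] - 1
--         if p >= 0:
--             c = bisect_right(a, p)
--             if p >= l[i]:
--                 c -= 1
--             ans += c
--     return ans // 2
-- ===== Notes on version B (the rewrite author's own statement) =====
-- stated objective: faster
-- what changed: B replaces A's fixed 1000001-cell counting array and full prefix-sum pass by one sort of the list and a binary search per element; Pre_ excludes lists holding a negative value when some of the first n thresholds k-l[i]-1 is nonnegative, because there A's tally of a negative value lands at the top of its fixed counting array through Python's negative-index wraparound, an artefact of the array implementation (where every threshold is negative both return 0 and such lists stay admitted).
-- outside the precondition, e.g. on f(2, 6, [0, -5]): A returns 0, B returns 1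
import Mathlib
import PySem

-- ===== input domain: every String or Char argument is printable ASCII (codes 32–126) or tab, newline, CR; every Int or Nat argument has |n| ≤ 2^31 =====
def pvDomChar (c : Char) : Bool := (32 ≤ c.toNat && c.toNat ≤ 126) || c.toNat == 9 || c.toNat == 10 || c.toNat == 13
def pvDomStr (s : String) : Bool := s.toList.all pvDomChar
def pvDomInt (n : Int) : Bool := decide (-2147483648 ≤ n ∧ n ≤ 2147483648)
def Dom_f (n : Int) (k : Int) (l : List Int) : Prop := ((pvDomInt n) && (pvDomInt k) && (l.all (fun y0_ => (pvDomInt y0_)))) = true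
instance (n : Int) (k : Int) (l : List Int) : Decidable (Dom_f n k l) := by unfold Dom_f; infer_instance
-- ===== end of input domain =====

-- B replaces A's fixed 1000001-cell counting array + prefix-sum pass by one sort of the
-- list and a binary search per element (objective: faster; a timing run's reading is
-- recorded by the check, not asserted here).


-- ===== PORT A =====
-- 'alt[i]' / 'alt[i] = v' on the Python list 'alt': a negative index counts from the end;
-- an access that is out of range even so raises IndexError in Python (those inputs are
-- outside Pre_f below), here it reads 0 / writes nothing.
def pyArrGet (a : Array Int) (i : Int) : Int :=
  let j := if i < 0 then i + a.size else i
  a.getD j.toNat 0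

def pyArrSet (a : Array Int) (i : Int) (v : Int) : Array Int :=
  let j := if i < 0 then i + a.size else i
  a.setIfInBounds j.toNat v

def f (n : Int) (k : Int) (l : List Int) : Int :=
  let alt : Array Int := Array.replicate 1000001 0           -- alt = [0] * 1000001
  let alt := l.foldl (fun a i => pyArrSet a i (pyArrGet a i + 1)) alt   -- for i in l: alt[i] += 1
  let alt := (PySem.List.pyRange 1 1000001 1).foldl                     -- for i in range(1, 1000001):
      (fun a i => pyArrSet a i (pyArrGet a i + pyArrGet a (i - 1))) alt --   alt[i] += alt[i-1]
  let ans := (PySem.List.pyRange 0 n 1).foldl                           -- for i in range(n):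
      (fun ans i =>
        let p := k - PySem.List.pyGetD l i 0 - 1                        --   p = k - l[i] - 1
        if p < 0 then ans                                               --   if p < 0: continue
        else
          let c := pyArrGet alt p                                       --   c = alt[p]
          let c := if PySem.List.pyGetD l i 0 ≤ p then c - 1 else c     --   if p >= l[i]: c -= 1
          ans + max 0 c) 0                                              --   ans += max(0, c)
  PySem.Int.floordiv ans 2                                              -- return ans // 2

-- ===== PORT B =====
-- 'bisect_right(a, p)' is PySem.List.bisectRight (exact); 'range(n)' is PySem.List.pyRange;
-- 'l[i]' is PySem.List.pyGetD (in range under Pre_f below).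
def f_alt (n : Int) (k : Int) (l : List Int) : Int :=
  let a := PySem.List.sorted l (fun x => x) false                       -- a = sorted(l)
  let ans := (PySem.List.pyRange 0 n 1).foldl                           -- for i in range(n):
      (fun ans i =>
        let p := k - PySem.List.pyGetD l i 0 - 1                        --   p = k - l[i] - 1
        if 0 ≤ p then                                                   --   if p >= 0:
          let c := (PySem.List.bisectRight a p : Int)                   --     c = bisect_right(a, p)
          let c := if PySem.List.pyGetD l i 0 ≤ p then c - 1 else c     --     if p >= l[i]: c -= 1
          ans + c                                                       --     ans += c
        else ans) 0
  PySem.Int.floordiv ans 2                                              -- return ans // 2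

-- ===== PRECONDITION & SPEC =====
-- Pre_f excludes (a) the inputs on which A raises IndexError: an element outside
-- [-1000001, 10^6], n > len(l), or a looked-up threshold k - l[i] - 1 > 10^6 for some
-- i < n; and (b) lists holding a negative value when some threshold k - l[i] - 1 with
-- i < n is nonnegative: there A's tally of a negative value lands at the top of its
-- fixed counting array through Python's negative-index wraparound, an artefact of the
-- array implementation (where every threshold is negative both programs return 0, so
-- such lists stay admitted through the second disjunct).
def Pre_f (n : Int) (k : Int) (l : List Int) : Prop :=
  n ≤ (l.length : Int) ∧ (∀ x ∈ l, -1000001 ≤ x ∧ x ≤ 1000000)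
    ∧ (∀ x ∈ l.take n.toNat, k - x ≤ 1000001 ∨ k ≤ x)
    ∧ ((∀ x ∈ l, 0 ≤ x) ∨ (∀ x ∈ l.take n.toNat, k ≤ x))
instance (n : Int) (k : Int) (l : List Int) : Decidable (Pre_f n k l) := by
  unfold Pre_f; infer_instance

def pvWitness_f : Int × Int × List Int := (3, 5, [1, 2, 3])

def Spec_f (n : Int) (k : Int) (l : List Int) (out : Int) : Prop := out = f_alt n k l
instance (n : Int) (k : Int) (l : List Int) (out : Int) : Decidable (Spec_f n k l out) := by unfold Spec_f; infer_instance

-- ===== CLAIM (what is proved, stated in full; the proofs are below) =====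
def Claim_equal_f : Prop := ∀ (n : Int) (k : Int) (l : List Int), Dom_f n k l → Pre_f n k l → Spec_f n k l (f n k l)

-- ===== LEMMAS AND PROOFS =====

-- the cell of A's array that the value x is tallied in
def wIdx (x : Int) : Nat := (if x < 0 then x + 1000001 else x).toNat

lemma pyArrSet_size (a : Array Int) (i v : Int) : (pyArrSet a i v).size = a.size := by
  simp [pyArrSet]

lemma pyArrGet_nat (a : Array Int) (v : Nat) : pyArrGet a (v : Int) = a.getD v 0 := by
  have h : ¬ ((v : Int) < 0) := by omega
  simp [pyArrGet, h]

lemma pyArrSet_nat (a : Array Int) (v : Nat) (w : Int) :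
    pyArrSet a (v : Int) w = a.setIfInBounds v w := by
  have h : ¬ ((v : Int) < 0) := by omega
  simp [pyArrSet, h]

lemma set_getD (a : Array Int) (j : Nat) (hj : j < a.size) (v : Int) (m : Nat) :
    (a.setIfInBounds j v).getD m 0 = if m = j then v else a.getD m 0 := by
  by_cases hm : m < a.size
  · by_cases hmj : m = j
    · subst hmj
      simp [Array.getD, hm]
    · simp [Array.getD, hm, hmj, Ne.symm hmj]
  · have hmj : m ≠ j := by omega
    simp [Array.getD, hm, hmj]

lemma pyArrSet_wIdx (a : Array Int) (ha : a.size = 1000001) (x w : Int) :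
    pyArrSet a x w = a.setIfInBounds (wIdx x) w := by
  simp [pyArrSet, wIdx, ha]

lemma pyArrGet_wIdx (a : Array Int) (ha : a.size = 1000001) (x : Int) :
    pyArrGet a x = a.getD (wIdx x) 0 := by
  simp [pyArrGet, wIdx, ha]

lemma wIdx_lt (x : Int) (hx : -1000001 ≤ x ∧ x ≤ 1000000) : wIdx x < 1000001 := by
  unfold wIdx
  split_ifs <;> omega

-- count loop: cell v of alt becomes (number of elements tallied in cell v)
lemma countLoop (l : List Int) : ∀ (a : Array Int), a.size = 1000001 →
    (∀ x ∈ l, -1000001 ≤ x ∧ x ≤ 1000000) → ∀ v : Nat, v < 1000001 →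
    ((l.foldl (fun a i => pyArrSet a i (pyArrGet a i + 1)) a).getD v 0)
      = a.getD v 0 + (l.countP (fun x => decide (wIdx x = v)) : Int) := by
  induction l with
  | nil => intro a _ _ v _; simp
  | cons x t ih =>
    intro a ha hl v hv
    have hx := hl x (by simp)
    have hwx : wIdx x < 1000001 := wIdx_lt x hx
    simp only [List.foldl_cons]
    rw [pyArrSet_wIdx a ha, pyArrGet_wIdx a ha]
    rw [ih _ (by simp [ha]) (fun y hy => hl y (by simp [hy])) v hv]
    rw [set_getD a (wIdx x) (by omega) _ v, List.countP_cons]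
    by_cases hvx : wIdx x = v
    · rw [if_pos hvx.symm, hvx, decide_eq_true rfl, if_pos rfl]
      push_cast
      ring
    · rw [if_neg (fun h => hvx h.symm), decide_eq_false hvx, if_neg (by simp)]
      push_cast
      ring

lemma step2_foldl_size (is : List Int) : ∀ a : Array Int,
    (is.foldl (fun a i => pyArrSet a i (pyArrGet a i + pyArrGet a (i - 1))) a).size = a.size := by
  induction is with
  | nil => intro a; rfl
  | cons i is ih => intro a; simp only [List.foldl_cons]; rw [ih, pyArrSet_size]

-- prefix loop over indices 1..m
lemma prefixLoop (m : Nat) : m ≤ 1000000 → ∀ (a : Array Int), a.size = 1000001 →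
    ∀ v : Nat, v < 1000001 →
    (((List.range m).map (fun t : Nat => (1 : Int) + (t : Int))).foldl
        (fun a i => pyArrSet a i (pyArrGet a i + pyArrGet a (i - 1))) a).getD v 0
      = if v ≤ m then ∑ t ∈ Finset.range (v + 1), a.getD t 0 else a.getD v 0 := by
  induction m with
  | zero =>
    intro _ a _ v _
    simp only [List.range_zero, List.map_nil, List.foldl_nil]
    split_ifs with h
    · have : v = 0 := by omega
      subst this
      simp
    · rfl
  | succ m ih =>
    intro hm a ha v hv
    rw [List.range_succ, List.map_append, List.foldl_append]
    simp only [List.map_cons, List.map_nil, List.foldl_cons, List.foldl_nil]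
    set b := ((List.range m).map (fun t : Nat => (1 : Int) + (t : Int))).foldl
        (fun a i => pyArrSet a i (pyArrGet a i + pyArrGet a (i - 1))) a with hbdef
    have hbsize : b.size = a.size := by
      rw [hbdef, step2_foldl_size]
    have hbv : ∀ w : Nat, w < 1000001 →
        b.getD w 0 = if w ≤ m then ∑ t ∈ Finset.range (w + 1), a.getD t 0 else a.getD w 0 :=
      ih (by omega) a ha
    have hcast : (1 : Int) + (m : Int) = ((m + 1 : Nat) : Int) := by omega
    have hcast2 : (1 : Int) + (m : Int) - 1 = ((m : Nat) : Int) := by omega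
    rw [hcast2, hcast, pyArrSet_nat, pyArrGet_nat, pyArrGet_nat]
    rw [set_getD b (m + 1) (by omega) _ v]
    by_cases hveq : v = m + 1
    · subst hveq
      rw [if_pos rfl, if_pos (le_refl _)]
      rw [hbv (m + 1) hv, hbv m (by omega)]
      rw [if_neg (by omega), if_pos (le_refl _)]
      conv_rhs => rw [Finset.sum_range_succ]
      ring
    · rw [if_neg hveq, hbv v hv]
      split_ifs <;> first | rfl | omega

lemma indSumNat (w p : Nat) :
    (∑ t ∈ Finset.range (p + 1), (if w = t then (1 : Int) else 0)) = if w ≤ p then 1 else 0 := by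
  induction p with
  | zero =>
    have h1 : (0 : Nat) + 1 = 1 := rfl
    rw [h1, Finset.sum_range_one]
    split_ifs <;> omega
  | succ p ih =>
    rw [Finset.sum_range_succ, ih]
    split_ifs <;> omega

-- summing the per-cell counts up to p counts the elements tallied in cells 0..p
lemma sumCount (l : List Int) (p : Nat) :
    (∑ t ∈ Finset.range (p + 1), (l.countP (fun x => decide (wIdx x = t)) : Int))
      = (l.countP (fun x => decide (wIdx x ≤ p)) : Int) := by
  induction l with
  | nil => simp
  | cons x t ih =>
    have hstep : ∀ tt ∈ Finset.range (p + 1),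
        (((x :: t).countP (fun y => decide (wIdx y = tt)) : Int))
          = ((t.countP (fun y => decide (wIdx y = tt)) : Int)) + (if wIdx x = tt then 1 else 0) := by
      intro tt _
      rw [List.countP_cons]
      by_cases hc : wIdx x = tt
      · rw [decide_eq_true hc, if_pos rfl, if_pos hc]
        push_cast
        ring
      · rw [decide_eq_false hc, if_neg (by simp), if_neg hc]
        push_cast
        ring
    rw [Finset.sum_congr rfl hstep, Finset.sum_add_distrib, ih, indSumNat (wIdx x) p,
        List.countP_cons]
    by_cases hc : wIdx x ≤ p
    · rw [decide_eq_true hc, if_pos rfl, if_pos hc]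
      push_cast
      ring
    · rw [if_neg hc, decide_eq_false_iff_not.mpr hc]
      simp

-- bisect_right on a sorted list counts the elements ≤ t
lemma bisectRight_eq (xs : List Int) (t : Int) (hs : xs.Pairwise (· ≤ ·)) :
    PySem.List.bisectRight xs t = xs.countP (fun y => decide (y ≤ t)) := by
  obtain ⟨hle, hlt, hge⟩ := PySem.List.bisectRight_spec xs t hs
  set b := PySem.List.bisectRight xs t with hb
  conv_rhs => rw [← List.take_append_drop b xs]
  rw [List.countP_append]
  have h1 : (xs.take b).countP (fun y => decide (y ≤ t)) = (xs.take b).length := by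
    apply List.countP_eq_length.mpr
    intro y hy
    obtain ⟨j, hj, rfl⟩ := List.mem_iff_getElem.mp hy
    have hjb : j < b := by simp at hj; omega
    have hjx : j < xs.length := by simp at hj; omega
    rw [List.getElem_take]
    simp only [decide_eq_true_eq]
    exact hlt j hjx hjb
  have h2 : (xs.drop b).countP (fun y => decide (y ≤ t)) = 0 := by
    apply List.countP_eq_zero.mpr
    intro y hy
    obtain ⟨j, hj, rfl⟩ := List.mem_iff_getElem.mp hy
    rw [List.getElem_drop]
    have hbj : b + j < xs.length := by simp at hj; omega
    have := hge (b + j) hbj (by omega)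
    simp only [decide_eq_true_eq]
    omega
  rw [h1, h2, List.length_take]
  omega

lemma foldl_skip (L : List Int) (body : Int → Int → Int) (init : Int)
    (h : ∀ acc, ∀ i ∈ L, body acc i = acc) : L.foldl body init = init := by
  induction L generalizing init with
  | nil => rfl
  | cons x t ih =>
    simp only [List.foldl_cons, h init x (by simp)]
    exact ih init (fun acc i hi => h acc i (List.mem_cons_of_mem _ hi))

set_option maxRecDepth 4096 in
lemma f_eq_f_alt (n k : Int) (l : List Int) (hp : Pre_f n k l) : f n k l = f_alt n k l := by
  obtain ⟨hn, hl, hk, hcase⟩ := hp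
  have hmem : ∀ i : Int, 0 ≤ i → i < n →
      PySem.List.pyGetD l i 0 ∈ l ∧ PySem.List.pyGetD l i 0 ∈ l.take n.toNat := by
    intro i hi0 hi1
    have hitn : i.toNat < l.length := by omega
    have hx : PySem.List.pyGetD l i 0 = l[i.toNat] :=
      PySem.List.pyGetD_eq_getElem l 0 hi0 (by omega)
    refine ⟨hx ▸ List.getElem_mem hitn, ?_⟩
    have hlen2 : i.toNat < (l.take n.toNat).length := by rw [List.length_take]; omega
    have he : (l.take n.toNat)[i.toNat] = l[i.toNat] := List.getElem_take
    rw [hx, ← he]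
    exact List.getElem_mem hlen2
  rcases hcase with hpos | hneg
  · -- every element nonnegative: the counting array agrees with bisection on the sorted list
    have hrange : PySem.List.pyRange 1 1000001 1
        = (List.range 1000000).map (fun t : Nat => (1 : Int) + (t : Int)) := by
      rw [PySem.List.pyRange_one]
      have e : ((1000001 : Int) - 1).toNat = 1000000 := rfl
      rw [e]
    unfold f f_alt
    dsimp only
    rw [hrange]
    set A1 := l.foldl (fun a i => pyArrSet a i (pyArrGet a i + 1)) (Array.replicate 1000001 0)
      with hA1def
    have hsize_any : ∀ (t : List Int) (a : Array Int),
        (t.foldl (fun a i => pyArrSet a i (pyArrGet a i + 1)) a).size = a.size := by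
      intro t
      induction t with
      | nil => intro a; rfl
      | cons y ys ih => intro a; simp [List.foldl_cons, ih, pyArrSet_size]
    have hA1size : A1.size = 1000001 := by rw [hA1def, hsize_any]; simp
    have hlw : ∀ x ∈ l, -1000001 ≤ x ∧ x ≤ 1000000 := hl
    have hA1 : ∀ v : Nat, v < 1000001 →
        A1.getD v 0 = (l.countP (fun x => decide (wIdx x = v)) : Int) := by
      intro v hv
      rw [hA1def, countLoop l _ (by simp) hlw v hv]
      simp [Array.getD, hv]
    set A2 := ((List.range 1000000).map (fun t : Nat => (1 : Int) + (t : Int))).foldl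
        (fun a i => pyArrSet a i (pyArrGet a i + pyArrGet a (i - 1))) A1 with hA2def
    have hA2 : ∀ p : Int, 0 ≤ p → p ≤ 1000000 →
        pyArrGet A2 p = (l.countP (fun x => decide (wIdx x ≤ p.toNat)) : Int) := by
      intro p h0 h1
      have hc : ((p.toNat : Nat) : Int) = p := by omega
      conv_lhs => rw [← hc]
      rw [pyArrGet_nat, hA2def,
          prefixLoop 1000000 le_rfl A1 hA1size p.toNat (by omega), if_pos (by omega)]
      have hterm : ∀ t ∈ Finset.range (p.toNat + 1),
          A1.getD t 0 = (l.countP (fun x => decide (wIdx x = t)) : Int) := by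
        intro t ht
        exact hA1 t (by simp at ht; omega)
      rw [Finset.sum_congr rfl hterm, sumCount l p.toNat]
    set a := PySem.List.sorted l (fun x => x) false with hadef
    have hBc : ∀ p : Int, 0 ≤ p →
        (PySem.List.bisectRight a p : Int)
          = (l.countP (fun x => decide (wIdx x ≤ p.toNat)) : Int) := by
      intro p h0
      have hsa : a.Pairwise (fun x1 x2 => x1 ≤ x2) := by
        rw [hadef]
        simpa using PySem.List.sorted_pairwise l (fun x => x)
      rw [bisectRight_eq a p hsa]
      have hperm : a.Perm l := PySem.List.sorted_perm _ _ _
      rw [hperm.countP_eq]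
      refine congrArg Nat.cast ?_
      apply List.countP_congr
      intro x hx
      have hx0 : 0 ≤ x := hpos x hx
      have hwx : wIdx x = x.toNat := by
        unfold wIdx
        rw [if_neg (by omega)]
      simp only [decide_eq_true_eq, hwx]
      omega
    refine congrArg (fun z => PySem.Int.floordiv z 2) ?_
    apply PySem.List.foldl_congr_mem
    intro acc i hi
    rw [PySem.List.mem_pyRange_one] at hi
    obtain ⟨hme, hmt⟩ := hmem i hi.1 hi.2
    set x := PySem.List.pyGetD l i 0 with hxdef
    obtain ⟨_, hx6⟩ := hl x hme
    have hx0 : 0 ≤ x := hpos x hme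
    have hkx := hk x hmt
    by_cases hp2 : k - x - 1 < 0
    · have hno : ¬ (0 ≤ k - x - 1) := by omega
      rw [if_pos hp2, if_neg hno]
    · have h0p : 0 ≤ k - x - 1 := by omega
      rw [if_neg hp2, if_pos h0p]
      have h1p : k - x - 1 ≤ 1000000 := by rcases hkx with h | h <;> omega
      rw [hA2 _ h0p h1p, hBc _ h0p]
      set cnt := (l.countP (fun y => decide (wIdx y ≤ (k - x - 1).toNat)) : Int) with hcnt
      have hcnt0 : 0 ≤ cnt := by
        rw [hcnt]
        positivity
      by_cases hxp : x ≤ k - x - 1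
      · simp only [if_pos hxp]
        have hpos2 : 0 < l.countP (fun y => decide (wIdx y ≤ (k - x - 1).toNat)) := by
          refine List.countP_pos_iff.mpr ⟨x, hme, ?_⟩
          have hwx : wIdx x = x.toNat := by
            unfold wIdx
            rw [if_neg (by omega)]
          simp only [decide_eq_true_eq, hwx]
          omega
        have h1c : 1 ≤ cnt := by rw [hcnt]; exact_mod_cast hpos2
        rw [max_eq_right (by omega)]
      · simp only [if_neg hxp]
        rw [max_eq_right hcnt0]
  · -- every threshold among the first n is negative: both loops add nothing
    unfold f f_alt
    dsimp only
    refine congrArg (fun z => PySem.Int.floordiv z 2) ?_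
    rw [foldl_skip, foldl_skip]
    · intro acc i hi
      rw [PySem.List.mem_pyRange_one] at hi
      have hkx := hneg _ (hmem i hi.1 hi.2).2
      have hno : ¬ (0 ≤ k - PySem.List.pyGetD l i 0 - 1) := by omega
      rw [if_neg hno]
    · intro acc i hi
      rw [PySem.List.mem_pyRange_one] at hi
      have hkx := hneg _ (hmem i hi.1 hi.2).2
      have hyes : k - PySem.List.pyGetD l i 0 - 1 < 0 := by omega
      rw [if_pos hyes]

-- ===== VERDICT (by name: the statement is the Claim_ definition above) =====
theorem f_spec : Claim_equal_f := by
  intro n k l _ hp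
  unfold Spec_f
  exact f_eq_f_alt n k l hp
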